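-- pv_equiv track=rewrite | github.com/charlottenguyen/STRFinder | create_repeat_specs.py | generate_all_motifs
-- ===== SOURCE A (Python) =====
-- def generate_all_motifs(input_motif):
--     base_to_number_dictionary = {"A": 1, "C" :2, "T": 3, "G": 4}
--     numeric_motif = [base_to_number_dictionary[letter] for letter in input_motif]
--     original_motifs = []
--     rev_comp_motifs = []
--     offset_vector = [offset for offset in range(1,(len(numeric_motif)+1))]
--     #k represents offset value
--     k = 0
--     while k < len(numeric_motif):
--         #Generate offset vector for given offset
--         offset_vector = [((x-1 + (len(numeric_motif)-1)) % (len(numeric_motif))+1)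
--                          for x in offset_vector]
--         #Add new motif to list of motifs
--         original_motifs.append([numeric_motif[val_off-1] for val_off in offset_vector])
--         k += 1
--     comp_motifs = [[x + 2 if x<3 else x - 2 for x in m] for m in original_motifs]
--     rev_comp_motifs = [motif_to_flip[::-1] for motif_to_flip in comp_motifs]
--     original_motifs.extend(rev_comp_motifs)
--     trans_motif_back = [[list(base_to_number_dictionary.keys())[list(base_to_number_dictionary.values()).index(x)]
--                          for x in motif] for motif in original_motifs]
--     motif_strings = [''.join(motif) for motif in trans_motif_back]
--     return motif_strings
-- ===== SOURCE B (Python) =====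
-- def generate_all_motifs(input_motif):
--     comp = {"A": "T", "C": "G", "T": "A", "G": "C"}
--     n = len(input_motif)
--     rotations = [input_motif[j:] + input_motif[:j] for j in range(n - 1, -1, -1)]
--     rev_comps = [''.join(comp[b] for b in rot)[::-1] for rot in rotations]
--     return rotations + rev_comps
-- ===== Notes on version B (the rewrite author's own statement) =====
-- stated objective: simpler
-- what changed: B works directly on the string: rotations by slicing (s[j:]+s[:j]) and reverse complements via a base->complement character map, replacing A's numeric encoding, offset-vector while loop, arithmetic complement and decode-via-list(keys)/values().index pipeline.
import Mathlib
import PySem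

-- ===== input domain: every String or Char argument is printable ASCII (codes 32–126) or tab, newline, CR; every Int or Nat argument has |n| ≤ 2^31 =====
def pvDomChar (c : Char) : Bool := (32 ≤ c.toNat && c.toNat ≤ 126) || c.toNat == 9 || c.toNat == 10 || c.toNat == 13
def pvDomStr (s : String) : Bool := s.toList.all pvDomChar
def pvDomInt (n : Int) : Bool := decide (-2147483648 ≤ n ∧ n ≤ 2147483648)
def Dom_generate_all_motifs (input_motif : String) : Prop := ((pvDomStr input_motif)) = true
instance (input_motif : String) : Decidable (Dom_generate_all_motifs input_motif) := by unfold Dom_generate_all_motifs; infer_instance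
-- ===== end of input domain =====

-- B replaces A's numeric-encoding/offset-vector pipeline by direct string slicing and a
-- base-complement character map (objective: simpler).

-- ===== PORT A =====
def pvBaseDict : PySem.Dict Char Int :=
  PySem.Dict.ofList [('A', 1), ('C', 2), ('T', 3), ('G', 4)]

-- base_to_number_dictionary[letter]; a missing key is a KeyError, excluded by Pre_ (default never read there)
def pvNum (c : Char) : Int := pvBaseDict.getD c 0

-- x + 2 if x < 3 else x - 2
def pvCompInt (x : Int) : Int := if x < 3 then x + 2 else x - 2

-- list(base_to_number_dictionary.keys())[list(base_to_number_dictionary.values()).index(x)];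
-- under Pre_ every x here is 1..4, so .index never raises and the defaults are never read
def pvTransBack (x : Int) : Char :=
  PySem.List.pyGetD pvBaseDict.keys ((((PySem.List.index? pvBaseDict.values x).getD 0 : Nat) : Int)) ' '

-- the while loop: k counts up, offset_vector is re-mapped, motifs are appended
def pvALoop (numeric : List Int) (k : Nat) (offset : List Int) (acc : List (List Int)) :
    List (List Int) :=
  if k < numeric.length then
    let offset' := offset.map (fun x =>
      PySem.Int.mod (x - 1 + ((numeric.length : Int) - 1)) (numeric.length : Int) + 1)
    let motif := offset'.map (fun v => PySem.List.pyGetD numeric (v - 1) 0)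
    pvALoop numeric (k + 1) offset' (acc ++ [motif])
  else acc
termination_by numeric.length - k

def generate_all_motifs (input_motif : String) : List String :=
  let numeric := input_motif.toList.map pvNum
  let original_motifs :=
    pvALoop numeric 0 (PySem.List.pyRange 1 ((numeric.length : Int) + 1) 1) []
  let comp_motifs := original_motifs.map (fun m => m.map pvCompInt)
  let rev_comp_motifs := comp_motifs.map (fun m => m.reverse)   -- m[::-1]
  let all_motifs := original_motifs ++ rev_comp_motifs
  let trans_motif_back := all_motifs.map (fun m => m.map pvTransBack)
  trans_motif_back.map (fun m => String.ofList m)                   -- ''.join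

-- ===== PORT B =====
def pvCompDict : PySem.Dict Char Char :=
  PySem.Dict.ofList [('A', 'T'), ('C', 'G'), ('T', 'A'), ('G', 'C')]

-- comp[b]; a missing key is a KeyError, excluded by Pre_ (default never read there)
def pvCompChar (b : Char) : Char := pvCompDict.getD b ' '

def generate_all_motifs_alt (input_motif : String) : List String :=
  let cs := input_motif.toList
  let n : Int := cs.length
  let rotations := (PySem.List.pyRange (n - 1) (-1) (-1)).map (fun j =>
    String.ofList (PySem.List.slice cs (some j) none ++ PySem.List.slice cs none (some j)))
  let rev_comps := rotations.map (fun rot =>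
    String.ofList ((rot.toList.map pvCompChar).reverse))               -- ''.join(...)[::-1]
  rotations ++ rev_comps

-- ===== PRECONDITION & SPEC =====
-- Pre_ excludes exactly the inputs with a letter outside {A,C,T,G}, on which A raises KeyError
-- (B raises KeyError there too).
def Pre_generate_all_motifs (input_motif : String) : Prop :=
  (input_motif.toList.all (fun c => c == 'A' || c == 'C' || c == 'T' || c == 'G')) = true
instance (input_motif : String) : Decidable (Pre_generate_all_motifs input_motif) := by
  unfold Pre_generate_all_motifs; infer_instance

def pvWitness_generate_all_motifs : String := "ACGT"

def Spec_generate_all_motifs (input_motif : String) (out : List String) : Prop :=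
  out = generate_all_motifs_alt input_motif
instance (input_motif : String) (out : List String) :
    Decidable (Spec_generate_all_motifs input_motif out) := by
  unfold Spec_generate_all_motifs; infer_instance

-- ===== CLAIM (what is proved, stated in full; the proofs are below) =====
def Claim_equal_generate_all_motifs : Prop :=
  ∀ (input_motif : String), Dom_generate_all_motifs input_motif →
    Pre_generate_all_motifs input_motif →
    Spec_generate_all_motifs input_motif (generate_all_motifs input_motif)

-- ===== LEMMAS AND PROOFS =====

-- offset_vector at entry to iteration k
def pvOffsetAt (n k : Nat) : List Int :=
  (List.range n).map (fun (p : Nat) => PySem.Int.mod ((p : Int) - k) n + 1)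

-- the motif appended at iteration k
def pvMotifAt (l : List Int) (k : Nat) : List Int :=
  (List.range l.length).map (fun (p : Nat) =>
    PySem.List.pyGetD l (PySem.Int.mod ((p : Int) - (k + 1)) l.length) 0)

lemma pv_offset_init (n : Nat) :
    PySem.List.pyRange 1 ((n : Int) + 1) 1 = pvOffsetAt n 0 := by
  rw [PySem.List.pyRange_one]
  unfold pvOffsetAt
  have : ((n : Int) + 1 - 1).toNat = n := by omega
  rw [this]
  apply List.map_congr_left
  intro p hp
  rw [List.mem_range] at hp
  rw [PySem.Int.mod_eq_emod_of_pos (by omega : (0:Int) < n)]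
  rw [Int.emod_eq_of_lt (by omega) (by omega)]
  omega

lemma pv_offset_step (n k : Nat) (hn : 0 < n) :
    (pvOffsetAt n k).map (fun x =>
      PySem.Int.mod (x - 1 + ((n : Int) - 1)) (n : Int) + 1) = pvOffsetAt n (k + 1) := by
  unfold pvOffsetAt
  rw [List.map_map]
  apply List.map_congr_left
  intro p hp
  rw [List.mem_range] at hp
  simp only [Function.comp]
  rw [PySem.Int.mod_eq_emod_of_pos (by omega : (0:Int) < n),
      PySem.Int.mod_eq_emod_of_pos (by omega : (0:Int) < n)]
  have h1 : ((p:Int) - k) % n + 1 - 1 + ((n:Int) - 1) = ((p:Int) - k) % n + ((n:Int) - 1) := by ring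
  rw [h1, Int.emod_add_emod]
  have h2 : (p:Int) - k + ((n:Int) - 1) = ((p:Int) - (k+1)) + n := by push_cast; ring
  rw [h2, Int.add_emod_right,
      PySem.Int.mod_eq_emod_of_pos (by omega : (0:Int) < n)]
  push_cast
  ring_nf

lemma pv_motif_of_offset (l : List Int) (k : Nat) :
    (pvOffsetAt l.length (k+1)).map (fun v => PySem.List.pyGetD l (v - 1) 0)
      = pvMotifAt l k := by
  unfold pvOffsetAt pvMotifAt
  rw [List.map_map]
  apply List.map_congr_left
  intro p _
  simp only [Function.comp]
  congr 1
  push_cast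
  ring

lemma pvALoop_spec (numeric : List Int) (k : Nat) (acc : List (List Int)) :
    pvALoop numeric k (pvOffsetAt numeric.length k) acc
      = acc ++ (List.range (numeric.length - k)).map (fun i => pvMotifAt numeric (k + i)) := by
  by_cases h : k < numeric.length
  · rw [pvALoop]
    simp only [h, if_true]
    rw [pv_offset_step _ _ (by omega), pv_motif_of_offset]
    rw [pvALoop_spec numeric (k+1) (acc ++ [pvMotifAt numeric k])]
    have hr : numeric.length - k = (numeric.length - (k+1)) + 1 := by omega
    rw [hr, List.range_succ_eq_map]
    simp only [List.map_cons, List.map_map, List.append_assoc, List.singleton_append,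
      Nat.add_zero]
    congr 1
    congr 1
    apply List.map_congr_left
    intro i _
    simp only [Function.comp]
    congr 1
    omega
  · rw [pvALoop]
    simp only [h, if_false]
    have : numeric.length - k = 0 := by omega
    rw [this]
    simp
termination_by numeric.length - k

lemma pv_rot_index {α : Type} (l : List α) (d : Nat) (hd : d < l.length) (d0 : α) :
    (List.range l.length).map (fun p => l.getD ((p + d) % l.length) d0)
      = l.drop d ++ l.take d := by
  have hn : 0 < l.length := by omega
  apply List.ext_getElem
  · simp; omega
  · intro i h1 h2
    simp only [List.getElem_map, List.getElem_range]
    have hi : i < l.length := by simpa using h1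
    rw [List.getD_eq_getElem l d0 (Nat.mod_lt _ hn)]
    rcases Nat.lt_or_ge i (l.length - d) with hc | hc
    · rw [List.getElem_append_left (by simp; omega)]
      rw [List.getElem_drop]
      congr 1
      rw [Nat.mod_eq_of_lt (by omega)]
      omega
    · rw [List.getElem_append_right (by simp; omega)]
      rw [List.getElem_take]
      have hidx : (i + d) % l.length = i - (l.drop d).length := by
        rw [Nat.mod_eq_sub_mod (by omega), Nat.mod_eq_of_lt (by omega)]
        simp only [List.length_drop]
        omega
      simp only [hidx]

lemma pv_motifAt_eq_rot (l : List Int) (k : Nat) (hk : k < l.length) :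
    pvMotifAt l k = l.drop (l.length - 1 - k) ++ l.take (l.length - 1 - k) := by
  have hn : 0 < l.length := by omega
  rw [← pv_rot_index l (l.length - 1 - k) (by omega) 0]
  unfold pvMotifAt
  apply List.map_congr_left
  intro p hp
  rw [List.mem_range] at hp
  have hmod : PySem.Int.mod ((p : Int) - (k + 1)) l.length
      = (((p + (l.length - 1 - k)) % l.length : Nat) : Int) := by
    rw [PySem.Int.mod_eq_emod_of_pos (by omega : (0:Int) < l.length)]
    have h2 : (p : Int) - (k + 1) = ((p + (l.length - 1 - k) : Nat) : Int) - l.length := by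
      push_cast [Nat.sub_sub]; omega
    rw [h2, Int.sub_emod_right]
    norm_cast
  rw [hmod, PySem.List.pyGetD_natCast]

lemma pv_trans_num (c : Char) (h : c = 'A' ∨ c = 'C' ∨ c = 'T' ∨ c = 'G') :
    pvTransBack (pvNum c) = c := by
  rcases h with h | h | h | h <;> subst h <;> decide

lemma pv_trans_comp_num (c : Char) (h : c = 'A' ∨ c = 'C' ∨ c = 'T' ∨ c = 'G') :
    pvTransBack (pvCompInt (pvNum c)) = pvCompChar c := by
  rcases h with h | h | h | h <;> subst h <;> decide


lemma pv_map_trans (r : List Char) (h : ∀ c ∈ r, c = 'A' ∨ c = 'C' ∨ c = 'T' ∨ c = 'G') :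
    (r.map pvNum).map pvTransBack = r := by
  rw [List.map_map]
  have := List.map_congr_left (l := r) (f := pvTransBack ∘ pvNum) (g := id)
    (fun c hc => pv_trans_num c (h c hc))
  simpa using this

lemma pv_map_transC (r : List Char) (h : ∀ c ∈ r, c = 'A' ∨ c = 'C' ∨ c = 'T' ∨ c = 'G') :
    ((r.map pvNum).map pvCompInt).map pvTransBack = r.map pvCompChar := by
  simp only [List.map_map]
  apply List.map_congr_left
  intro c hc
  exact pv_trans_comp_num c (h c hc)

-- ===== VERDICT (by name: the statement is the Claim_ definition above) =====
theorem generate_all_motifs_spec : Claim_equal_generate_all_motifs := by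
  intro s _ hPre0
  unfold Pre_generate_all_motifs at hPre0
  rw [List.all_eq_true] at hPre0
  have hPre : ∀ c ∈ s.toList, c = 'A' ∨ c = 'C' ∨ c = 'T' ∨ c = 'G' := by
    intro c hc
    have := hPre0 c hc
    simp only [Bool.or_eq_true, beq_iff_eq] at this
    tauto
  have hmemrot : ∀ d : Nat, ∀ c ∈ s.toList.drop d ++ s.toList.take d,
      c = 'A' ∨ c = 'C' ∨ c = 'T' ∨ c = 'G' := by
    intro d c hc
    rcases List.mem_append.1 hc with h | h
    · exact hPre c (List.mem_of_mem_drop h)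
    · exact hPre c (List.mem_of_mem_take h)
  unfold Spec_generate_all_motifs generate_all_motifs generate_all_motifs_alt
  simp only [List.length_map, List.map_map]
  rw [pv_offset_init]
  have hloop : pvALoop (List.map pvNum s.toList) 0 (pvOffsetAt s.toList.length 0) []
      = (List.range s.toList.length).map (fun i => pvMotifAt (List.map pvNum s.toList) i) := by
    have h := pvALoop_spec (List.map pvNum s.toList) 0 []
    simpa using h
  rw [hloop]
  rw [PySem.List.pyRange_neg_one]
  have hnn : ((s.toList.length : Int) - 1 - (-1)).toNat = s.toList.length := by omega
  rw [hnn]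
  simp only [List.map_append, List.map_map]
  refine congrArg₂ (fun (a b : List String) => a ++ b) ?_ ?_
  · apply List.map_congr_left
    intro k hk
    rw [List.mem_range] at hk
    simp only [Function.comp]
    have hd : ((s.toList.length : Int) - 1 - k) = ((s.toList.length - 1 - k : Nat) : Int) := by
      omega
    rw [hd, PySem.List.slice_from_natCast, PySem.List.slice_to_natCast]
    rw [pv_motifAt_eq_rot _ k (by simpa using hk)]
    simp only [List.length_map]
    rw [← List.map_drop, ← List.map_take, ← List.map_append, pv_map_trans _ (hmemrot _)]
  · apply List.map_congr_left
    intro k hk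
    rw [List.mem_range] at hk
    simp only [Function.comp]
    have hd : ((s.toList.length : Int) - 1 - k) = ((s.toList.length - 1 - k : Nat) : Int) := by
      omega
    rw [hd, PySem.List.slice_from_natCast, PySem.List.slice_to_natCast]
    simp only [String.toList_ofList]
    rw [pv_motifAt_eq_rot _ k (by simpa using hk)]
    simp only [List.length_map]
    rw [← List.map_drop, ← List.map_take, ← List.map_append]
    rw [List.map_reverse]
    rw [pv_map_transC _ (hmemrot _)]
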